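-- pv_equiv track=rewrite | github.com/girinath18/OCR | edge.py | group_text_by_bounding_box
-- ===== SOURCE A (Python) =====
-- def group_text_by_bounding_box(extracted_boxes, bounding_boxes):
--     """
--     Groups text by the predefined bounding boxes.
--
--     :param extracted_boxes: List of tuples, each containing (text, (x, y, w, h)) where (x, y, w, h) are box coordinates
--     :param bounding_boxes: List of predefined bounding boxes
--     :return: Dictionary where keys are bounding boxes and values are lists of grouped text
--     """
--     grouped_text = {box: [] for box in bounding_boxes}
--
--     for text, (x, y, w, h) in extracted_boxes:
--         for box in bounding_boxes:
--             x_min, y_min, width, height = box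
--             x_max = x_min + width
--             y_max = y_min + height
--             if x_min <= x <= x_max and y_min <= y <= y_max:
--                 grouped_text[box].append(text)
--                 break
--
--     return grouped_text
-- ===== SOURCE B (Python) =====
-- def group_text_by_bounding_box(extracted_boxes, bounding_boxes):
--     """Inverted nesting: outer loop over the (deduplicated) boxes, inner pass over
--     the points with a set of already-assigned point indices."""
--     grouped_text = {box: [] for box in bounding_boxes}
--     assigned = set()
--     for box in grouped_text:
--         x_min, y_min, width, height = box
--         x_max = x_min + width
--         y_max = y_min + height
--         texts = grouped_text[box]
--         for i, (text, (x, y, w, h)) in enumerate(extracted_boxes):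
--             if i not in assigned and x_min <= x <= x_max and y_min <= y <= y_max:
--                 texts.append(text)
--                 assigned.add(i)
--     return grouped_text
-- ===== Notes on version B (the rewrite author's own statement) =====
-- stated objective: alternative
-- what changed: Inverts the loop nesting: B's outer loop runs over the (deduplicated) bounding boxes and its inner pass over enumerate(extracted_boxes) with a set of already-assigned point indices, instead of A's per-point inner scan over boxes with break.
import Mathlib
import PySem

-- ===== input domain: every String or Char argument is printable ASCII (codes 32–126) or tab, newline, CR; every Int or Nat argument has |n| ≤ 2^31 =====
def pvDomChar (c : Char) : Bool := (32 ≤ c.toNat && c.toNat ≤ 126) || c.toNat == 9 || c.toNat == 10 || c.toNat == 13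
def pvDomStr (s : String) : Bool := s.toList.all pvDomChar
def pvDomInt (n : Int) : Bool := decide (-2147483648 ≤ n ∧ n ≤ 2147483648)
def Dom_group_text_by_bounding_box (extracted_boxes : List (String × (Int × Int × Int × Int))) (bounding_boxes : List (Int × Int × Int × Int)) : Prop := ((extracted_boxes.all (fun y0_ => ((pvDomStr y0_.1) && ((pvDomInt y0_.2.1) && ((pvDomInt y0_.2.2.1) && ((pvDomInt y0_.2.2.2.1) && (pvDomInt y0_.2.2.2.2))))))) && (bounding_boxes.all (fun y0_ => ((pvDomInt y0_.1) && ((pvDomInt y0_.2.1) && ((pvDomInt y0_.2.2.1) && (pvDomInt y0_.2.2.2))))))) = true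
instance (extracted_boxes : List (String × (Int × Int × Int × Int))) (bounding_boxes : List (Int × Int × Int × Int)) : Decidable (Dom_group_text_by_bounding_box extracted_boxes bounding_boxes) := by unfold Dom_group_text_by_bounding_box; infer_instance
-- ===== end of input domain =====

-- B inverts A's loop nesting (outer loop over the deduplicated boxes, inner pass over the
-- enumerated points with a set of already-assigned indices); same cost, alternative structure.
-- Equivalence is about the RETURN value (neither Python mutates its arguments).

-- ===== PORT A =====
-- inner 'for box in bounding_boxes: … break' loop of A
def pvInnerA (grouped : PySem.Dict (Int × Int × Int × Int) (List String)) (text : String)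
    (x y : Int) : List (Int × Int × Int × Int) → PySem.Dict (Int × Int × Int × Int) (List String)
  | [] => grouped
  | box :: rest =>
    let x_min := box.1
    let y_min := box.2.1
    let width := box.2.2.1
    let height := box.2.2.2
    let x_max := x_min + width
    let y_max := y_min + height
    if x_min ≤ x ∧ x ≤ x_max ∧ y_min ≤ y ∧ y ≤ y_max then
      grouped.modify box [] (fun l => l ++ [text])   -- grouped_text[box].append(text); key always present
    else
      pvInnerA grouped text x y rest

def group_text_by_bounding_box (extracted_boxes : List (String × (Int × Int × Int × Int))) (bounding_boxes : List (Int × Int × Int × Int)) : List (Int × Int × Int × Int × List String) :=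
  let grouped_text : PySem.Dict (Int × Int × Int × Int) (List String) :=
    bounding_boxes.foldl (fun d box => d.insert box ([] : List String)) PySem.Dict.empty
  let grouped := extracted_boxes.foldl (fun d p => pvInnerA d p.1 p.2.1 p.2.2.1 bounding_boxes) grouped_text
  grouped.items.map (fun p => (p.1.1, p.1.2.1, p.1.2.2.1, p.1.2.2.2, p.2))

-- ===== PORT B =====
-- inner 'for i, (text, (x, y, w, h)) in enumerate(extracted_boxes)' loop of B
def pvInnerB (state : List String × PySem.Set Int) (x_min y_min x_max y_max : Int)
    (pts : List (Int × (String × (Int × Int × Int × Int)))) : List String × PySem.Set Int :=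
  pts.foldl (fun st ip =>
    if ¬ (PySem.Set.contains st.2 ip.1) ∧ x_min ≤ ip.2.2.1 ∧ ip.2.2.1 ≤ x_max ∧ y_min ≤ ip.2.2.2.1 ∧ ip.2.2.2.1 ≤ y_max then
      (st.1 ++ [ip.2.1], PySem.Set.add st.2 ip.1)
    else st) state

def group_text_by_bounding_box_alt (extracted_boxes : List (String × (Int × Int × Int × Int))) (bounding_boxes : List (Int × Int × Int × Int)) : List (Int × Int × Int × Int × List String) :=
  let grouped_text : PySem.Dict (Int × Int × Int × Int) (List String) :=
    bounding_boxes.foldl (fun d box => d.insert box ([] : List String)) PySem.Dict.empty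
  let res := grouped_text.keys.foldl
    (fun (st : List ((Int × Int × Int × Int) × List String) × PySem.Set Int) box =>
      let x_max := box.1 + box.2.2.1
      let y_max := box.2.1 + box.2.2.2
      let inner := pvInnerB (([] : List String), st.2) box.1 box.2.1 x_max y_max (PySem.List.enumerate extracted_boxes 0)
      (st.1 ++ [(box, inner.1)], inner.2))
    (([] : List ((Int × Int × Int × Int) × List String)), PySem.Set.empty)
  res.1.map (fun p => (p.1.1, p.1.2.1, p.1.2.2.1, p.1.2.2.2, p.2))

-- ===== PRECONDITION & SPEC =====
def Spec_group_text_by_bounding_box (extracted_boxes : List (String × (Int × Int × Int × Int))) (bounding_boxes : List (Int × Int × Int × Int)) (out : List (Int × Int × Int × Int × List String)) : Prop := out = group_text_by_bounding_box_alt extracted_boxes bounding_boxes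
instance (extracted_boxes : List (String × (Int × Int × Int × Int))) (bounding_boxes : List (Int × Int × Int × Int)) (out : List (Int × Int × Int × Int × List String)) : Decidable (Spec_group_text_by_bounding_box extracted_boxes bounding_boxes out) := by unfold Spec_group_text_by_bounding_box; infer_instance

-- ===== CLAIM (what is proved, stated in full; the proofs are below) =====
def Claim_equal_group_text_by_bounding_box : Prop := ∀ (extracted_boxes : List (String × (Int × Int × Int × Int))) (bounding_boxes : List (Int × Int × Int × Int)), Dom_group_text_by_bounding_box extracted_boxes bounding_boxes → Spec_group_text_by_bounding_box extracted_boxes bounding_boxes (group_text_by_bounding_box extracted_boxes bounding_boxes)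

-- ===== LEMMAS AND PROOFS =====

-- the containment test both programs make, as a Bool on a box and a point
def pvCond (box : Int × Int × Int × Int) (p : String × (Int × Int × Int × Int)) : Bool :=
  decide (box.1 ≤ p.2.1 ∧ p.2.1 ≤ box.1 + box.2.2.1 ∧ box.2.1 ≤ p.2.2.1 ∧ p.2.2.1 ≤ box.2.1 + box.2.2.2)

-- the common normal form: for each distinct box (first-occurrence order), the texts of the
-- points whose FIRST containing box in bounding_boxes is that box, in point order
def pvVal (extracted_boxes : List (String × (Int × Int × Int × Int))) (bounding_boxes : List (Int × Int × Int × Int)) (k : Int × Int × Int × Int) : List String :=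
  (extracted_boxes.filter (fun p => bounding_boxes.find? (fun b => pvCond b p) == some k)).map (·.1)

def pvNF (extracted_boxes : List (String × (Int × Int × Int × Int))) (bounding_boxes : List (Int × Int × Int × Int)) : List ((Int × Int × Int × Int) × List String) :=
  (PySem.List.dedup bounding_boxes).map (fun k => (k, pvVal extracted_boxes bounding_boxes k))

lemma pv_find?_foldl_add {α : Type} [BEq α] [LawfulBEq α] (p : α → Bool) :
    ∀ (l s : List α), List.find? p (l.foldl PySem.Set.add s) = (List.find? p s).or (List.find? p l) := by
  intro l
  induction l with
  | nil => intro s; simp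
  | cons x xs ih =>
    intro s
    rw [List.foldl_cons, ih]
    unfold PySem.Set.add
    by_cases hc : PySem.Set.contains s x = true
    · simp only [hc, if_pos]
      cases hf : List.find? p s with
      | none =>
        have hx : p x = false := by
          have hmem : x ∈ s := by
            simpa [PySem.Set.contains, List.contains_iff_mem] using hc
          have := List.find?_eq_none.mp hf x hmem
          simpa using this
        simp [List.find?_cons, hx, hf, Option.or]
      | some v => simp [hf, Option.or]
    · simp only [hc]
      rw [if_neg (by simp), List.find?_append, Option.or_assoc]
      congr 1
      cases hx : p x <;> simp [List.find?_cons, hx, Option.or]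

lemma pv_find?_dedup {α : Type} [BEq α] [LawfulBEq α] (p : α → Bool) (l : List α) :
    List.find? p (PySem.List.dedup l) = List.find? p l := by
  rw [PySem.List.dedup_eq_ofList, PySem.Set.ofList_eq_foldl, pv_find?_foldl_add]
  simp

-- A's inner loop = first matching box, modified
lemma pv_innerA_eq (d : PySem.Dict (Int × Int × Int × Int) (List String)) (text : String) (x y : Int) :
    ∀ boxes, pvInnerA d text x y boxes =
      match boxes.find? (fun b => pvCond b (text, (x, y, 0, 0))) with
      | some b => d.modify b [] (fun l => l ++ [text])
      | none => d := by
  intro boxes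
  induction boxes with
  | nil => simp [pvInnerA]
  | cons box rest ih =>
    by_cases h : box.1 ≤ x ∧ x ≤ box.1 + box.2.2.1 ∧ box.2.1 ≤ y ∧ y ≤ box.2.1 + box.2.2.2
    · simp [pvInnerA, h, List.find?_cons, pvCond]
    · simp [pvInnerA, h, List.find?_cons, pvCond, ih]

lemma pv_A_getD (bounding_boxes : List (Int × Int × Int × Int)) :
    ∀ (eb : List (String × (Int × Int × Int × Int))) (d : PySem.Dict (Int × Int × Int × Int) (List String)) (k : Int × Int × Int × Int),
      (eb.foldl (fun d p => pvInnerA d p.1 p.2.1 p.2.2.1 bounding_boxes) d).getD k [] =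
        d.getD k [] ++ pvVal eb bounding_boxes k := by
  intro eb
  induction eb with
  | nil => intro d k; simp [pvVal]
  | cons p ps ih =>
    intro d k
    rw [List.foldl_cons, pv_innerA_eq, ih]
    have hcc : (fun b => pvCond b (p.1, (p.2.1, p.2.2.1, 0, 0))) = (fun b => pvCond b p) := rfl
    rw [hcc]
    cases hf : bounding_boxes.find? (fun b => pvCond b p) with
    | none => simp [pvVal, hf]
    | some b =>
      by_cases hk : k = b
      · subst hk
        rw [PySem.Dict.getD_modify]
        simp [pvVal, hf, List.filter_cons]
      · rw [PySem.Dict.getD_modify]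
        simp only [if_neg hk]
        have : (some b == some k) = false := by simp [Ne.symm hk]
        simp [pvVal, hf, List.filter_cons, this]

lemma pv_A_keys (bounding_boxes : List (Int × Int × Int × Int)) :
    ∀ (eb : List (String × (Int × Int × Int × Int))) (d : PySem.Dict (Int × Int × Int × Int) (List String)),
      (∀ b ∈ bounding_boxes, b ∈ d.keys) →
      (eb.foldl (fun d p => pvInnerA d p.1 p.2.1 p.2.2.1 bounding_boxes) d).keys = d.keys := by
  intro eb
  induction eb with
  | nil => intro d _; rfl
  | cons p ps ih =>
    intro d hd
    rw [List.foldl_cons, pv_innerA_eq]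
    have hcc : (fun b => pvCond b (p.1, (p.2.1, p.2.2.1, 0, 0))) = (fun b => pvCond b p) := rfl
    rw [hcc]
    cases hf : bounding_boxes.find? (fun b => pvCond b p) with
    | none => exact ih d hd
    | some b =>
      have hb : b ∈ d.keys := hd b (List.mem_of_find?_eq_some hf)
      have hkeys : (d.modify b [] (fun l => l ++ [p.1])).keys = d.keys := by
        rw [PySem.Dict.keys_modify]
        exact PySem.Dict.keys_insert_of_contains d _ ((PySem.Dict.contains_iff_mem_keys d b).mpr hb)
      rw [ih _ (by rw [hkeys]; exact hd), hkeys]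

lemma pv_init_keys (bounding_boxes : List (Int × Int × Int × Int)) :
    (bounding_boxes.foldl (fun d box => d.insert box ([] : List String)) PySem.Dict.empty).keys
      = PySem.List.dedup bounding_boxes := by
  rw [PySem.Dict.keys_foldl_insert (f := fun _ _ => ([] : List String)), PySem.Dict.keys_empty,
    PySem.List.dedup_eq_ofList, PySem.Set.ofList_eq_foldl]
  rfl

lemma pv_init_getD (bounding_boxes : List (Int × Int × Int × Int)) (k : Int × Int × Int × Int) :
    (bounding_boxes.foldl (fun d box => d.insert box ([] : List String)) PySem.Dict.empty).getD k [] = [] := by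
  suffices h : ∀ (l : List (Int × Int × Int × Int)) (d : PySem.Dict (Int × Int × Int × Int) (List String)),
      (∀ j, d.getD j [] = []) → ∀ j, (l.foldl (fun d box => d.insert box ([] : List String)) d).getD j [] = [] by
    exact h bounding_boxes PySem.Dict.empty (fun j => PySem.Dict.getD_empty j []) k
  intro l
  induction l with
  | nil => intro d hd j; exact hd j
  | cons b bs ih =>
    intro d hd j
    refine ih _ ?_ j
    intro j'
    rw [PySem.Dict.getD_insert]
    split <;> simp [hd]

-- A's assoc list equals the normal form
lemma pv_A_nf (eb : List (String × (Int × Int × Int × Int))) (bb : List (Int × Int × Int × Int)) :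
    (eb.foldl (fun d p => pvInnerA d p.1 p.2.1 p.2.2.1 bb)
      (bb.foldl (fun d box => d.insert box ([] : List String)) PySem.Dict.empty)).items = pvNF eb bb := by
  set d0 := bb.foldl (fun d box => d.insert box ([] : List String)) PySem.Dict.empty with hd0
  have hkeys0 : d0.keys = PySem.List.dedup bb := pv_init_keys bb
  have hmem : ∀ b ∈ bb, b ∈ d0.keys := by
    intro b hb; rw [hkeys0]; exact (PySem.List.mem_dedup bb b).mpr hb
  have hkeys : (eb.foldl (fun d p => pvInnerA d p.1 p.2.1 p.2.2.1 bb) d0).keys = PySem.List.dedup bb := by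
    rw [pv_A_keys bb eb d0 hmem, hkeys0]
  have hnodup : (eb.foldl (fun d p => pvInnerA d p.1 p.2.1 p.2.2.1 bb) d0).keys.Nodup := by
    rw [hkeys]; exact PySem.List.nodup_dedup bb
  rw [PySem.Dict.items_eq_map_keys _ hnodup ([] : List String), hkeys]
  unfold pvNF
  refine List.map_congr_left ?_
  intro k _
  rw [pv_A_getD bb eb d0 k, pv_init_getD bb k]
  simp

-- with distinct indices, List.any over an index-matching condition picks out the unique pair
lemma pv_any_index {g : Int × (String × (Int × Int × Int × Int)) → Bool} :
    ∀ (pts : List (Int × (String × (Int × Int × Int × Int)))), (pts.map (·.1)).Nodup →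
      ∀ ip ∈ pts, pts.any (fun ip' => ip'.1 == ip.1 && g ip') = g ip := by
  intro pts
  induction pts with
  | nil => intro _ ip h; simp at h
  | cons q rest ih =>
    intro hnd ip hip
    have hnd' : (rest.map (·.1)).Nodup := (List.nodup_cons.mp hnd).2
    have hq : q.1 ∉ rest.map (·.1) := (List.nodup_cons.mp hnd).1
    rcases List.mem_cons.mp hip with rfl | hmem
    · have hrest : rest.any (fun ip' => ip'.1 == ip.1 && g ip') = false := by
        simp only [List.any_eq_false]
        intro ip' hip'
        have : ip'.1 ≠ ip.1 := by
          intro he; exact hq (he ▸ List.mem_map_of_mem hip')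
        simp [this]
      simp [List.any_cons, hrest]
    · have hne : q.1 ≠ ip.1 := by
        intro he; exact hq (he ▸ List.mem_map_of_mem hmem)
      simp [List.any_cons, hne, ih hnd' ip hmem]

-- B's inner loop: collected texts and resulting assigned set, given a characterisation P of s
lemma pv_contains_add (s : PySem.Set Int) (x j : Int) :
    PySem.Set.contains (PySem.Set.add s x) j = (PySem.Set.contains s j || j == x) := by
  have hmem : ∀ (t : PySem.Set Int) (y : Int), PySem.Set.contains t y = decide (y ∈ t) := by
    intro t y; simp [PySem.Set.contains, List.contains_iff_mem]
  rw [hmem, hmem]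
  by_cases h : j = x
  · subst h; simp [PySem.Set.mem_add]
  · simp [PySem.Set.mem_add, h]

lemma pv_innerB_spec (x_min y_min x_max y_max : Int) :
    ∀ (pts : List (Int × (String × (Int × Int × Int × Int)))) (a : List String) (s : PySem.Set Int)
      (P : Int × (String × (Int × Int × Int × Int)) → Bool),
      (pts.map (·.1)).Nodup →
      (∀ ip ∈ pts, PySem.Set.contains s ip.1 = P ip) →
      (pvInnerB (a, s) x_min y_min x_max y_max pts).1 =
        a ++ (pts.filter (fun ip => !P ip &&
          decide (x_min ≤ ip.2.2.1 ∧ ip.2.2.1 ≤ x_max ∧ y_min ≤ ip.2.2.2.1 ∧ ip.2.2.2.1 ≤ y_max))).map (·.2.1)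
      ∧ ∀ j, PySem.Set.contains (pvInnerB (a, s) x_min y_min x_max y_max pts).2 j =
          (PySem.Set.contains s j || pts.any (fun ip => ip.1 == j && (!P ip &&
            decide (x_min ≤ ip.2.2.1 ∧ ip.2.2.1 ≤ x_max ∧ y_min ≤ ip.2.2.2.1 ∧ ip.2.2.2.1 ≤ y_max)))) := by
  intro pts
  induction pts with
  | nil => intro a s P _ _; simp [pvInnerB]
  | cons ip rest ih =>
    intro a s P hnd hs
    have hnd' : (rest.map (·.1)).Nodup := (List.nodup_cons.mp hnd).2
    have hq : ip.1 ∉ rest.map (·.1) := (List.nodup_cons.mp hnd).1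
    have hhead : PySem.Set.contains s ip.1 = P ip := hs ip List.mem_cons_self
    have hstep : pvInnerB (a, s) x_min y_min x_max y_max (ip :: rest) =
        pvInnerB (if ¬ (PySem.Set.contains s ip.1) ∧ x_min ≤ ip.2.2.1 ∧ ip.2.2.1 ≤ x_max ∧ y_min ≤ ip.2.2.2.1 ∧ ip.2.2.2.1 ≤ y_max then
          (a ++ [ip.2.1], PySem.Set.add s ip.1) else (a, s)) x_min y_min x_max y_max rest := by
      rfl
    by_cases hc : x_min ≤ ip.2.2.1 ∧ ip.2.2.1 ≤ x_max ∧ y_min ≤ ip.2.2.2.1 ∧ ip.2.2.2.1 ≤ y_max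
    · by_cases hP : P ip = true
      · -- already assigned: skip
        rw [hstep, if_neg (by rw [hhead, hP]; simp)]
        obtain ⟨h1, h2⟩ := ih a s P hnd' (fun q hqm => hs q (List.mem_cons_of_mem _ hqm))
        refine ⟨?_, ?_⟩
        · rw [h1, List.filter_cons]
          simp [hP]
        · intro j
          rw [h2 j, List.any_cons]
          simp [hP]
      · -- not assigned and inside: take
        rw [hstep, if_pos (by rw [hhead]; simpa [hP] using hc)]
        have hs' : ∀ q ∈ rest, PySem.Set.contains (PySem.Set.add s ip.1) q.1 = P q := by
          intro q hqm
          rw [pv_contains_add]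
          have hne : q.1 ≠ ip.1 := by
            intro he; exact hq (he ▸ List.mem_map_of_mem hqm)
          rw [hs q (List.mem_cons_of_mem _ hqm)]
          simp [hne]
        obtain ⟨h1, h2⟩ := ih (a ++ [ip.2.1]) (PySem.Set.add s ip.1) P hnd' hs'
        refine ⟨?_, ?_⟩
        · rw [h1, List.filter_cons]
          simp [hP, hc]
        · intro j
          rw [h2 j, pv_contains_add, List.any_cons]
          by_cases hj : ip.1 = j
          · subst hj; simp [hP, hc]
          · have e1 : (j == ip.1) = false := beq_eq_false_iff_ne.mpr (Ne.symm hj)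
            have e2 : (ip.1 == j) = false := beq_eq_false_iff_ne.mpr hj
            rw [e1, e2]
            simp
    · -- outside the box: skip
      rw [hstep, if_neg (by tauto)]
      obtain ⟨h1, h2⟩ := ih a s P hnd' (fun q hqm => hs q (List.mem_cons_of_mem _ hqm))
      refine ⟨?_, ?_⟩
      · rw [h1, List.filter_cons]
        simp [hc]
      · intro j
        rw [h2 j, List.any_cons]
        simp [hc]

-- the per-key values of B's outer fold, with the already-processed prefix made explicit
def pvGacc (pts : List (Int × (String × (Int × Int × Int × Int)))) :
    List (Int × Int × Int × Int) → List (Int × Int × Int × Int) → List ((Int × Int × Int × Int) × List String)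
  | _, [] => []
  | prev, k :: ks =>
      (k, (pts.filter (fun ip => !(prev.any (fun b => pvCond b ip.2)) && pvCond k ip.2)).map (·.2.1))
        :: pvGacc pts (prev ++ [k]) ks

lemma pv_outer (eb : List (String × (Int × Int × Int × Int))) :
    ∀ (keys prev : List (Int × Int × Int × Int)) (acc : List ((Int × Int × Int × Int) × List String)) (s : PySem.Set Int),
      ((PySem.List.enumerate eb 0).map (·.1)).Nodup →
      (∀ ip ∈ PySem.List.enumerate eb 0, PySem.Set.contains s ip.1 = prev.any (fun b => pvCond b ip.2)) →
      (keys.foldl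
        (fun (st : List ((Int × Int × Int × Int) × List String) × PySem.Set Int) box =>
          let x_max := box.1 + box.2.2.1
          let y_max := box.2.1 + box.2.2.2
          let inner := pvInnerB (([] : List String), st.2) box.1 box.2.1 x_max y_max (PySem.List.enumerate eb 0)
          (st.1 ++ [(box, inner.1)], inner.2)) (acc, s)).1
      = acc ++ pvGacc (PySem.List.enumerate eb 0) prev keys := by
  intro keys
  induction keys with
  | nil => intro prev acc s _ _; simp [pvGacc]
  | cons k ks ih =>
    intro prev acc s hnd hs
    rw [List.foldl_cons]
    obtain ⟨h1, h2⟩ := pv_innerB_spec k.1 k.2.1 (k.1 + k.2.2.1) (k.2.1 + k.2.2.2)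
      (PySem.List.enumerate eb 0) [] s (fun ip => prev.any (fun b => pvCond b ip.2)) hnd hs
    have hcond : ∀ ip : Int × (String × (Int × Int × Int × Int)),
        decide (k.1 ≤ ip.2.2.1 ∧ ip.2.2.1 ≤ k.1 + k.2.2.1 ∧ k.2.1 ≤ ip.2.2.2.1 ∧ ip.2.2.2.1 ≤ k.2.1 + k.2.2.2)
          = pvCond k ip.2 := fun ip => rfl
    have hs' : ∀ ip ∈ PySem.List.enumerate eb 0,
        PySem.Set.contains (pvInnerB ([], s) k.1 k.2.1 (k.1 + k.2.2.1) (k.2.1 + k.2.2.2) (PySem.List.enumerate eb 0)).2 ip.1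
          = (prev ++ [k]).any (fun b => pvCond b ip.2) := by
      intro ip hip
      rw [h2 ip.1, hs ip hip, List.any_append]
      have hidx := pv_any_index (g := fun ip' => !(prev.any (fun b => pvCond b ip'.2)) && pvCond k ip'.2)
        (PySem.List.enumerate eb 0) hnd ip hip
      simp only [hcond] at *
      rw [hidx]
      cases hP : prev.any (fun b => pvCond b ip.2) <;> simp [hP]
    rw [ih (prev ++ [k]) _ _ hnd hs']
    simp only [pvGacc, h1, hcond]
    simp

lemma pv_find_first {α : Type} [BEq α] [LawfulBEq α] (p : α → Bool) (prev rest : List α) (k : α)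
    (h : (prev ++ k :: rest).Nodup) :
    (List.find? p (prev ++ k :: rest) == some k) = (!prev.any p && p k) := by
  have hk_prev : k ∉ prev := by
    intro hmem
    exact (List.disjoint_of_nodup_append h) hmem List.mem_cons_self
  have hk_rest : k ∉ rest := by
    have := (List.nodup_append.mp h).2.1
    exact (List.nodup_cons.mp this).1
  rw [List.find?_append]
  cases hf : List.find? p prev with
  | none =>
    have hprev : prev.any p = false := by
      simp only [List.any_eq_false]
      intro x hx
      simpa using List.find?_eq_none.mp hf x hx
    cases hpk : p k with
    | true => simp [List.find?_cons, hpk, hprev, Option.or]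
    | false =>
      simp only [List.find?_cons, hpk, Option.or, hprev, Bool.not_false, Bool.true_and]
      cases hfr : List.find? p rest with
      | none => simp
      | some v =>
        have hv : v ∈ rest := List.mem_of_find?_eq_some hfr
        have : v ≠ k := by rintro rfl; exact hk_rest hv
        simp [this]
  | some v =>
    have hv : v ∈ prev := List.mem_of_find?_eq_some hf
    have hvk : v ≠ k := by rintro rfl; exact hk_prev hv
    have hprev : prev.any p = true := List.any_eq_true.mpr ⟨v, hv, List.find?_some hf⟩
    simp [Option.or, hvk, hprev]

lemma pv_gacc_eq (pts : List (Int × (String × (Int × Int × Int × Int)))) :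
    ∀ (keys prev : List (Int × Int × Int × Int)), (prev ++ keys).Nodup →
      pvGacc pts prev keys = keys.map (fun k => (k,
        (pts.filter (fun ip => (prev ++ keys).find? (fun b => pvCond b ip.2) == some k)).map (·.2.1))) := by
  intro keys
  induction keys with
  | nil => intro prev _; simp [pvGacc]
  | cons k ks ih =>
    intro prev hnd
    unfold pvGacc
    have hhead : (pts.filter (fun ip => !(prev.any (fun b => pvCond b ip.2)) && pvCond k ip.2))
        = pts.filter (fun ip => (prev ++ k :: ks).find? (fun b => pvCond b ip.2) == some k) := by
      refine List.filter_congr ?_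
      intro ip _
      rw [pv_find_first (fun b => pvCond b ip.2) prev ks k hnd]
    have hnd' : ((prev ++ [k]) ++ ks).Nodup := by
      rw [← List.append_cons]; exact hnd
    rw [hhead, ih (prev ++ [k]) hnd']
    rw [← List.append_cons]
    rfl

lemma pv_filter_enumerate (q : String × (Int × Int × Int × Int) → Bool) :
    ∀ (eb : List (String × (Int × Int × Int × Int))) (s : Int),
      ((PySem.List.enumerate eb s).filter (fun ip => q ip.2)).map (·.2.1) = (eb.filter q).map (·.1) := by
  intro eb
  induction eb with
  | nil => intro s; simp [PySem.List.enumerate]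
  | cons p ps ih =>
    intro s
    rw [PySem.List.enumerate_cons, List.filter_cons, List.filter_cons]
    cases hq : q p <;> simp [hq, ih (s + 1)]

-- B's assoc list equals the normal form
lemma pv_B_nf (eb : List (String × (Int × Int × Int × Int))) (bb : List (Int × Int × Int × Int)) :
    ((bb.foldl (fun d box => d.insert box ([] : List String)) PySem.Dict.empty).keys.foldl
      (fun (st : List ((Int × Int × Int × Int) × List String) × PySem.Set Int) box =>
        let x_max := box.1 + box.2.2.1
        let y_max := box.2.1 + box.2.2.2
        let inner := pvInnerB (([] : List String), st.2) box.1 box.2.1 x_max y_max (PySem.List.enumerate eb 0)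
        (st.1 ++ [(box, inner.1)], inner.2))
      (([] : List ((Int × Int × Int × Int) × List String)), PySem.Set.empty)).1 = pvNF eb bb := by
  rw [pv_init_keys bb]
  have hnd : ((PySem.List.enumerate eb 0).map (·.1)).Nodup :=
    (List.pairwise_map).mpr ((PySem.List.pairwise_lt_enumerate eb 0).imp fun h => ne_of_lt h)
  have hs0 : ∀ ip ∈ PySem.List.enumerate eb 0,
      PySem.Set.contains PySem.Set.empty ip.1 = ([] : List (Int × Int × Int × Int)).any (fun b => pvCond b ip.2) := by
    intro ip _; rfl
  rw [pv_outer eb (PySem.List.dedup bb) [] [] PySem.Set.empty hnd hs0,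
    pv_gacc_eq (PySem.List.enumerate eb 0) (PySem.List.dedup bb) []
      (by simpa using PySem.List.nodup_dedup bb)]
  simp only [List.nil_append]
  unfold pvNF pvVal
  refine List.map_congr_left ?_
  intro k _
  have hfd : (fun ip : Int × (String × (Int × Int × Int × Int)) =>
      ((PySem.List.dedup bb).find? (fun b => pvCond b ip.2) == some k))
      = fun ip => (bb.find? (fun b => pvCond b ip.2) == some k) :=
    funext fun ip => by rw [pv_find?_dedup]
  rw [hfd]
  exact congrArg (fun L => (k, L)) (pv_filter_enumerate (fun p => bb.find? (fun b => pvCond b p) == some k) eb 0)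

-- ===== VERDICT (by name: the statement is the Claim_ definition above) =====
theorem group_text_by_bounding_box_spec : Claim_equal_group_text_by_bounding_box := by
  intro eb bb _
  unfold Spec_group_text_by_bounding_box group_text_by_bounding_box group_text_by_bounding_box_alt
  simp only [pv_A_nf, pv_B_nf]
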